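-- pv_equiv track=rewrite | github.com/pypi-data/pypi-mirror-164 | packages/dowapy/DowaPy-0.1.8.2-py3-none-any.whl/dowapy/Data/NamingRule.py | AnalyzeNamingForm
-- ===== SOURCE A (Python) =====
-- def AnalyzeNamingForm(Form):
--     SavedBracketIndex = {}
--     FrontIndex = -1
--     EndIndex = -1
--     Counter = -1
--     FileNameStruct = []
--     VariableNameStorage = {}
--
--     # Find bracket and save index
--     for Index, AtoZ in enumerate(Form):
--         if AtoZ == "{":
--             FrontIndex = Index
--         elif AtoZ == "}":
--             if FrontIndex != -1:
--                 EndIndex = Index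
--                 SavedBracketIndex[len(SavedBracketIndex)] = [FrontIndex, EndIndex]
--
--     # Split words by bracket location and make bracket word specifize
--     for Index, Pair in enumerate(SavedBracketIndex):
--         FrontIndex = SavedBracketIndex[Pair][0]
--         EndIndex = SavedBracketIndex[Pair][1]
--
--         # if frontest words are exist
--         if Index <= 0:
--             Counter += 1
--             FileNameStruct.append(Form[0: SavedBracketIndex[Pair][0]])
--
--         # this pairs word
--         Counter += 1
--         FileNameStruct.append(Form[SavedBracketIndex[Pair][0]: SavedBracketIndex[Pair][1] + 1])
--         VariableNameStorage[Counter] = Form[FrontIndex + 1: EndIndex]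
--
--         # words between current and next
--         if Pair + 1 < len(SavedBracketIndex):
--             Counter += 1
--             FileNameStruct.append(Form[SavedBracketIndex[Pair][1] + 1:SavedBracketIndex[Pair + 1][0]])
--
--         # end of words
--         if Pair + 1 >= len(SavedBracketIndex):
--             if SavedBracketIndex[Pair][1] < len(Form):
--                 FileNameStruct.append(Form[SavedBracketIndex[Pair][1] + 1:len(Form)])
--
--     return VariableNameStorage, FileNameStruct
-- ===== SOURCE B (Python) =====
-- def AnalyzeNamingForm(Form):
--     # Single left-to-right scan: emit segments as each '}' closes a pair.
--     VariableNameStorage = {}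
--     FileNameStruct = []
--     Front = -1          # persistent, like the original: never reset after use
--     Counter = -1
--     PrevEnd = -1        # end index of the last closed pair (-1 before the first)
--     for Index, Ch in enumerate(Form):
--         if Ch == "{":
--             Front = Index
--         elif Ch == "}" and Front != -1:
--             Counter += 1
--             FileNameStruct.append(Form[PrevEnd + 1:Front])   # prefix / between-segment
--             Counter += 1
--             FileNameStruct.append(Form[Front:Index + 1])     # the bracket text
--             VariableNameStorage[Counter] = Form[Front + 1:Index]
--             PrevEnd = Index
--     if PrevEnd != -1:
--         FileNameStruct.append(Form[PrevEnd + 1:])            # tail after the last pair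
--     return VariableNameStorage, FileNameStruct
-- ===== Notes on version B (the rewrite author's own statement) =====
-- stated objective: simpler
-- what changed: Replaced A's two passes (collect all bracket pairs into an index dictionary keyed 0..n-1, then split the string by indexed lookups into that dictionary, peeking at the next pair) with a single left-to-right scan that emits the preceding segment and the bracket text as soon as each closing brace completes a pair, tracking only the persistent front index, the running counter and the last closed end.
import Mathlib
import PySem

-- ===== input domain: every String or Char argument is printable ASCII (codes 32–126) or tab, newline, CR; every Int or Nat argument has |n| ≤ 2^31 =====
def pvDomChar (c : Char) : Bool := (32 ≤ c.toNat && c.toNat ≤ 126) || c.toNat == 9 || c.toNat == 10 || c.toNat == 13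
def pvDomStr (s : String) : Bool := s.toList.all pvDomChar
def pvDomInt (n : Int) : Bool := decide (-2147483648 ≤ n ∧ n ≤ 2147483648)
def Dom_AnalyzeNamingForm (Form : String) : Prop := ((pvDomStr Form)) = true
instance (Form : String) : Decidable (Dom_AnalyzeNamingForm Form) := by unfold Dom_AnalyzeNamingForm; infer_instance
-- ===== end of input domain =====

-- B replaces A's two passes (collect all bracket pairs into a dict, then split by indexed
-- lookups over that dict) with a single left-to-right scan that emits each segment as soon
-- as a '}' closes a pair; objective: simpler (one pass, no intermediate index dictionary).

-- ===== PORT A =====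
-- pass-1 body: find brackets and save [FrontIndex, EndIndex] (a two-element list → Int × Int)
def pvAScan (st : Int × Int × PySem.Dict Int (Int × Int)) (ia : Int × Char) :
    Int × Int × PySem.Dict Int (Int × Int) :=
  if ia.2 == '{' then (ia.1, st.2.1, st.2.2)
  else if ia.2 == '}' then
    if st.1 != -1 then (st.1, ia.1, st.2.2.insert ((st.2.2.size : Int)) (st.1, ia.1))
    else st
  else st

-- pass-2 body: split words by bracket location; state = (Counter, FileNameStruct, VariableNameStorage)
def pvASplit (Form : String) (saved : PySem.Dict Int (Int × Int))
    (st : Int × List String × PySem.Dict Int String) (ip : Int × Int) :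
    Int × List String × PySem.Dict Int String :=
  let pr := saved.getD ip.2 (0, 0)
  -- if frontest words are exist
  let st1 := if ip.1 ≤ 0 then
      (st.1 + 1, st.2.1 ++ [PySem.Str.slice Form (some 0) (some pr.1)], st.2.2)
    else st
  -- this pairs word
  let st2 := (st1.1 + 1,
    st1.2.1 ++ [PySem.Str.slice Form (some pr.1) (some (pr.2 + 1))],
    st1.2.2.insert (st1.1 + 1) (PySem.Str.slice Form (some (pr.1 + 1)) (some pr.2)))
  -- words between current and next
  let st3 := if ip.2 + 1 < (saved.size : Int) then
      (st2.1 + 1,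
       st2.2.1 ++ [PySem.Str.slice Form (some (pr.2 + 1)) (some (saved.getD (ip.2 + 1) (0, 0)).1)],
       st2.2.2)
    else st2
  -- end of words
  if ip.2 + 1 ≥ (saved.size : Int) then
    if pr.2 < PySem.Str.len Form then
      (st3.1, st3.2.1 ++ [PySem.Str.slice Form (some (pr.2 + 1)) (some (PySem.Str.len Form))], st3.2.2)
    else st3
  else st3

def AnalyzeNamingForm (Form : String) : (List (Int × String)) × List String :=
  let p1 := (PySem.List.enumerate Form.toList 0).foldl pvAScan (-1, -1, PySem.Dict.mk [])
  let saved := p1.2.2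
  let p2 := (PySem.List.enumerate saved.keys 0).foldl (pvASplit Form saved) (-1, [], PySem.Dict.mk [])
  (p2.2.2.items, p2.2.1)

-- ===== PORT B =====
-- single-scan body; state = (Front, Counter, PrevEnd, VariableNameStorage, FileNameStruct)
def pvBScan (Form : String) (st : Int × Int × Int × PySem.Dict Int String × List String)
    (ic : Int × Char) : Int × Int × Int × PySem.Dict Int String × List String :=
  match st with
  | (front, counter, prevEnd, vars, struc) =>
    if ic.2 == '{' then (ic.1, counter, prevEnd, vars, struc)
    else if ic.2 == '}' && front != -1 then
      let c1 := counter + 1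
      let s1 := struc ++ [PySem.Str.slice Form (some (prevEnd + 1)) (some front)]
      let c2 := c1 + 1
      let s2 := s1 ++ [PySem.Str.slice Form (some front) (some (ic.1 + 1))]
      (front, c2, ic.1, vars.insert c2 (PySem.Str.slice Form (some (front + 1)) (some ic.1)), s2)
    else st

def AnalyzeNamingForm_alt (Form : String) : (List (Int × String)) × List String :=
  let r := (PySem.List.enumerate Form.toList 0).foldl (pvBScan Form) (-1, -1, -1, PySem.Dict.mk [], [])
  let struc := if r.2.2.1 != -1 then r.2.2.2.2 ++ [PySem.Str.slice Form (some (r.2.2.1 + 1)) none]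
               else r.2.2.2.2
  (r.2.2.2.1.items, struc)

-- ===== PRECONDITION & SPEC =====
def Spec_AnalyzeNamingForm (Form : String) (out : (List (Int × String)) × List String) : Prop := out = AnalyzeNamingForm_alt Form
instance (Form : String) (out : (List (Int × String)) × List String) : Decidable (Spec_AnalyzeNamingForm Form out) := by unfold Spec_AnalyzeNamingForm; infer_instance

-- ===== CLAIM (what is proved, stated in full; the proofs are below) =====
def Claim_equal_AnalyzeNamingForm : Prop := ∀ (Form : String), Dom_AnalyzeNamingForm Form → Spec_AnalyzeNamingForm Form (AnalyzeNamingForm Form)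

-- ===== LEMMAS AND PROOFS =====

-- proof-only plain-list version of A's pass 1 (the dict's keys are just 0,1,2,…)
def pvP1 (st : Int × Int × List (Int × Int)) (ia : Int × Char) : Int × Int × List (Int × Int) :=
  if ia.2 == '{' then (ia.1, st.2.1, st.2.2)
  else if ia.2 == '}' then
    if st.1 != -1 then (st.1, ia.1, st.2.2 ++ [(st.1, ia.1)]) else st
  else st

-- proof-only: B's per-pair emission step; state = (Counter, PrevEnd, vars, struct)
def pvBPair (Form : String) (st : Int × Int × PySem.Dict Int String × List String) (p : Int × Int) :
    Int × Int × PySem.Dict Int String × List String :=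
  (st.1 + 2, p.2,
   st.2.2.1.insert (st.1 + 2) (PySem.Str.slice Form (some (p.1 + 1)) (some p.2)),
   st.2.2.2 ++ [PySem.Str.slice Form (some (st.2.1 + 1)) (some p.1),
                PySem.Str.slice Form (some p.1) (some (p.2 + 1))])

def pvMapB (Form : String) (vals : List (Int × Int)) : Int × Int × PySem.Dict Int String × List String :=
  vals.foldl (pvBPair Form) (-1, -1, PySem.Dict.mk [], [])

-- proof-only structural recursion describing A's pass-2 loop from its second iteration on
def pvP2rest (Form : String) : List (Int × Int) → (Int × List String × PySem.Dict Int String) → (Int × List String × PySem.Dict Int String)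
  | [], st => st
  | (f, e) :: rest, (c, ss, vs) =>
    let c1 := c + 1
    let ss1 := ss ++ [PySem.Str.slice Form (some f) (some (e + 1))]
    let vs1 := vs.insert c1 (PySem.Str.slice Form (some (f + 1)) (some e))
    match rest with
    | (f2, _) :: _ => pvP2rest Form rest (c1 + 1, ss1 ++ [PySem.Str.slice Form (some (e + 1)) (some f2)], vs1)
    | [] => if e < PySem.Str.len Form then (c1, ss1 ++ [PySem.Str.slice Form (some (e + 1)) (some (PySem.Str.len Form))], vs1) else (c1, ss1, vs1)

-- one unfolding of pvP2rest when at least one more pair follows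
theorem pvP2rest_cons_cons (Form : String) (f e f2 e2 : Int) (rest : List (Int × Int))
    (c : Int) (ss : List String) (vs : PySem.Dict Int String) :
    pvP2rest Form ((f, e) :: (f2, e2) :: rest) (c, ss, vs)
    = pvP2rest Form ((f2, e2) :: rest)
        (c + 1 + 1,
         (ss ++ [PySem.Str.slice Form (some f) (some (e + 1))])
           ++ [PySem.Str.slice Form (some (e + 1)) (some f2)],
         vs.insert (c + 1) (PySem.Str.slice Form (some (f + 1)) (some e))) := rfl

-- slicing to the exact end of the string is slicing to the end
theorem pv_slice_end (s : String) (a : Int) (h : 0 ≤ a) :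
    PySem.Str.slice s (some a) (some (PySem.Str.len s)) = PySem.Str.slice s (some a) none := by
  apply String.toList_inj.mp
  simp only [PySem.Str.toList_slice, PySem.Chars.slice_eq_listSlice]
  rw [PySem.List.slice_toNat _ h (by rw [PySem.Str.len_eq]; positivity),
      PySem.List.slice_from _ h]
  apply List.take_of_length_le
  simp [PySem.Str.len_eq]

-- lookup in the dict built with keys s, s+1, … is positional lookup
theorem pv_get_enum {ν : Type} (vals : List ν) (s : Int) (j : Nat) :
    (PySem.Dict.mk (PySem.List.enumerate vals s)).get? (s + (j : Int)) = vals[j]? := by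
  induction vals generalizing s j with
  | nil => simp [PySem.List.enumerate_nil, PySem.Dict.get?]
  | cons v vs ih =>
    rw [PySem.List.enumerate_cons, PySem.Dict.get?_mk_cons]
    cases j with
    | zero => simp
    | succ k =>
      have hne : (s == s + ((k + 1 : Nat) : Int)) = false := by
        simp only [beq_eq_false_iff_ne]; push_cast; omega
      have harg : s + ((k + 1 : Nat) : Int) = (s + 1) + (k : Int) := by push_cast; ring
      rw [hne, harg]
      simp only [if_false, Bool.false_eq_true]
      rw [ih (s + 1) k]
      simp

-- A's pass 1 with the dict equals the plain-list pass 1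
theorem pv_pass1_plain (l : List (Int × Char)) (f e : Int) (vals : List (Int × Int)) :
    l.foldl pvAScan (f, e, PySem.Dict.mk (PySem.List.enumerate vals 0))
    = ((l.foldl pvP1 (f, e, vals)).1, (l.foldl pvP1 (f, e, vals)).2.1,
       PySem.Dict.mk (PySem.List.enumerate (l.foldl pvP1 (f, e, vals)).2.2 0)) := by
  induction l generalizing f e vals with
  | nil => simp
  | cons ia l ih =>
    simp only [List.foldl_cons]
    by_cases h1 : (ia.2 == '{') = true
    · simp only [pvAScan, pvP1, h1, if_true]
      exact ih ia.1 e vals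
    · by_cases h2 : (ia.2 == '}') = true
      · by_cases h3 : (f != -1) = true
        · have hkey : ((PySem.Dict.mk (PySem.List.enumerate vals 0)).size : Int)
              = (0 : Int) + (vals.length : Int) := by
            simp [PySem.Dict.size, PySem.List.length_enumerate]
          have hget : (PySem.Dict.mk (PySem.List.enumerate vals 0)).get?
              ((0 : Int) + (vals.length : Int)) = none := by
            rw [pv_get_enum]; simp
          have hc := (PySem.Dict.get?_eq_none_iff_contains _ _).mp hget
          have hstep : pvAScan (f, e, PySem.Dict.mk (PySem.List.enumerate vals 0)) ia
              = (f, ia.1, PySem.Dict.mk (PySem.List.enumerate (vals ++ [(f, ia.1)]) 0)) := by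
            simp only [pvAScan, h1, h2, h3, if_true, if_false, Bool.false_eq_true]
            rw [hkey]
            simp only [PySem.Dict.insert, hc, Bool.false_eq_true, if_false]
            rw [PySem.List.enumerate_append]
            simp [PySem.List.enumerate_cons, PySem.List.enumerate_nil]
          have hstep' : pvP1 (f, e, vals) ia = (f, ia.1, vals ++ [(f, ia.1)]) := by
            simp only [pvP1, h1, h2, h3, if_true, if_false, Bool.false_eq_true]
          rw [hstep, hstep', ih]
        · have h3' : (f != -1) = false := by revert h3; cases (f != -1) <;> simp
          simp only [pvAScan, pvP1, h1, h2, h3', if_true, if_false, Bool.false_eq_true]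
          exact ih f e vals
      · simp only [pvAScan, pvP1, h1, h2, if_false, Bool.false_eq_true]
        exact ih f e vals

-- B's scan is pass 1 fused with per-pair emission
theorem pv_fuse (Form : String) (l : List (Int × Char)) (f e : Int) (vals : List (Int × Int)) :
    l.foldl (pvBScan Form) (f, pvMapB Form vals)
    = ((l.foldl pvP1 (f, e, vals)).1, pvMapB Form (l.foldl pvP1 (f, e, vals)).2.2) := by
  induction l generalizing f e vals with
  | nil => simp
  | cons ic l ih =>
    simp only [List.foldl_cons]
    by_cases h1 : (ic.2 == '{') = true
    · simp only [pvBScan, pvP1, h1, if_true]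
      exact ih ic.1 e vals
    · by_cases h2 : (ic.2 == '}') = true
      · by_cases h3 : (f != -1) = true
        · have hstepB : pvBScan Form (f, pvMapB Form vals) ic
              = (f, pvMapB Form (vals ++ [(f, ic.1)])) := by
            simp only [pvBScan, pvMapB, h1, h2, h3, Bool.and_self, if_false, Bool.false_eq_true,
              if_true, List.foldl_append, List.foldl_cons, List.foldl_nil, pvBPair]
            simp [List.append_assoc, add_assoc]
          have hstepP : pvP1 (f, e, vals) ic = (f, ic.1, vals ++ [(f, ic.1)]) := by
            simp only [pvP1, h1, h2, h3, if_true, if_false, Bool.false_eq_true]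
          rw [hstepB, hstepP, ih]
        · have h3' : (f != -1) = false := by revert h3; cases (f != -1) <;> simp
          simp only [pvBScan, pvP1, h1, h2, h3', if_true, if_false, Bool.false_eq_true,
            Bool.and_false]
          exact ih f e vals
      · have h2' : (ic.2 == '}') = false := by revert h2; cases (ic.2 == '}') <;> simp
        simp only [pvBScan, pvP1, h1, h2', if_false, Bool.false_eq_true, Bool.false_and]
        exact ih f e vals

-- the pairs found by pass 1 all end at a real character index
theorem pv_inv (N : Int) (l : List (Int × Char)) (f e : Int) (vals : List (Int × Int))
    (hv : ∀ p ∈ vals, 0 ≤ p.2 ∧ p.2 < N) (hl : ∀ ic ∈ l, 0 ≤ ic.1 ∧ ic.1 < N) :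
    ∀ p ∈ (l.foldl pvP1 (f, e, vals)).2.2, 0 ≤ p.2 ∧ p.2 < N := by
  induction l generalizing f e vals with
  | nil => simp only [List.foldl_nil]; exact hv
  | cons ic l ih =>
    simp only [List.foldl_cons, pvP1]
    have hic := hl ic (List.mem_cons_self ..)
    have hl' : ∀ p ∈ l, 0 ≤ p.1 ∧ p.1 < N := fun p hp => hl p (List.mem_cons_of_mem _ hp)
    split_ifs with h1 h2 h3
    · exact ih ic.1 e vals hv hl'
    · refine ih f ic.1 (vals ++ [(f, ic.1)]) ?_ hl'
      intro p hp
      rcases List.mem_append.mp hp with h | h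
      · exact hv p h
      · simp only [List.mem_singleton] at h
        subst h; exact hic
    · exact ih f e vals hv hl'
    · exact ih f e vals hv hl' 

-- enumerating the keys 0,…,m-1 gives the pairs (i, i)
theorem pv_keys (m : Nat) :
    PySem.List.enumerate (PySem.List.pyRange 0 (m : Int)) 0
    = (List.range m).map (fun i : Nat => ((i : Int), (i : Int))) := by
  induction m with
  | zero => simp [PySem.List.enumerate_nil]
  | succ m ih =>
    have hlen : (PySem.List.pyRange 0 (m : Int)).length = m := by
      have := congrArg List.length ih
      simp only [PySem.List.length_enumerate, List.length_map, List.length_range] at this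
      exact this
    have hsplit : PySem.List.pyRange 0 ((m + 1 : Nat) : Int)
        = PySem.List.pyRange 0 (m : Int) ++ [(m : Int)] := by
      have : ((m + 1 : Nat) : Int) = (m : Int) + 1 := by push_cast; ring
      rw [this, PySem.List.pyRange_one_succ_right (by positivity)]
    rw [hsplit, PySem.List.enumerate_append, hlen, ih, List.range_succ]
    simp [PySem.List.enumerate_cons, PySem.List.enumerate_nil]

-- A's indexed pass-2 loop, from iteration j ≥ 1 on, is pvP2rest on the remaining pairs
theorem pv_idx (Form : String) (vals : List (Int × Int)) (k j : Nat)
    (st : Int × List String × PySem.Dict Int String)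
    (hjk : j + k = vals.length) (hj : 1 ≤ j) :
    ((List.range' j k).map (fun i : Nat => ((i : Int), (i : Int)))).foldl
        (pvASplit Form (PySem.Dict.mk (PySem.List.enumerate vals 0))) st
    = pvP2rest Form (vals.drop j) st := by
  induction k generalizing j st with
  | zero =>
    have hnil : vals.drop j = [] := List.drop_of_length_le (by omega)
    simp [hnil, pvP2rest]
  | succ k ih =>
    obtain ⟨c, ss, vs⟩ := st
    have hj' : j < vals.length := by omega
    rcases hd : vals.drop j with _ | ⟨⟨f, e⟩, t⟩
    · exact absurd (congrArg List.length hd) (by simp; omega)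
    have ht : vals.drop (j + 1) = t := by rw [← List.tail_drop, hd]; rfl
    have hval : vals[j]'hj' = (f, e) := by
      have h0 : (vals.drop j)[0]'(by rw [hd]; simp) = vals[j + 0]'(by omega) :=
        List.getElem_drop ..
      simpa [hd] using h0.symm
    have hgetj : (PySem.Dict.mk (PySem.List.enumerate vals 0)).getD ((j : Int)) (0, 0) = (f, e) := by
      have h1 : ((j : Int)) = 0 + (j : Int) := by ring
      rw [PySem.Dict.getD, h1, pv_get_enum, List.getElem?_eq_getElem hj', hval]
      rfl
    rw [List.range'_succ, List.map_cons, List.foldl_cons]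
    have hsize : ((PySem.Dict.mk (PySem.List.enumerate vals 0)).size : Int) = (vals.length : Int) := by
      simp [PySem.Dict.size, PySem.List.length_enumerate]
    rcases hd2 : vals.drop (j + 1) with _ | ⟨⟨f2, e2⟩, t2⟩
    · -- last pair: k = 0
      have hk : k = 0 := by
        have := congrArg List.length hd2
        simp at this; omega
      subst hk
      have hlast : j + 1 = vals.length := by
        have := congrArg List.length hd2
        simp at this; omega
      have hstep : pvASplit Form (PySem.Dict.mk (PySem.List.enumerate vals 0)) (c, ss, vs)
          ((j : Int), (j : Int)) = pvP2rest Form ((f, e) :: []) (c, ss, vs) := by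
        have hc1 : ¬((j : Int) ≤ 0) := by omega
        have hc2 : ¬((j : Int) + 1 < (vals.length : Int)) := by omega
        have hc3 : (j : Int) + 1 ≥ (vals.length : Int) := by omega
        simp only [pvASplit, pvP2rest, hgetj, hsize, if_neg hc1, if_neg hc2, if_pos hc3]
      rw [hstep]
      rw [ht] at hd2; subst hd2
      simp
    · -- more pairs follow: k ≥ 1
      have hj1 : j + 1 < vals.length := by
        have := congrArg List.length hd2
        simp at this; omega
      have hval2 : vals[j + 1]'hj1 = (f2, e2) := by
        have h0 : (vals.drop (j + 1))[0]'(by rw [hd2]; simp) = vals[(j + 1) + 0]'(by omega) :=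
          List.getElem_drop ..
        simpa [hd2] using h0.symm
      have hgetj2 : (PySem.Dict.mk (PySem.List.enumerate vals 0)).getD ((j : Int) + 1) (0, 0)
          = (f2, e2) := by
        have h1 : ((j : Int) + 1) = 0 + ((j + 1 : Nat) : Int) := by push_cast; ring
        rw [PySem.Dict.getD, h1, pv_get_enum, List.getElem?_eq_getElem hj1, hval2]
        rfl
      have hstep : pvASplit Form (PySem.Dict.mk (PySem.List.enumerate vals 0)) (c, ss, vs)
          ((j : Int), (j : Int))
          = (c + 1 + 1, (ss ++ [PySem.Str.slice Form (some f) (some (e + 1))])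
               ++ [PySem.Str.slice Form (some (e + 1)) (some f2)],
             vs.insert (c + 1) (PySem.Str.slice Form (some (f + 1)) (some e))) := by
        have hc1 : ¬((j : Int) ≤ 0) := by omega
        have hc2 : (j : Int) + 1 < (vals.length : Int) := by omega
        have hc3 : ¬((j : Int) + 1 ≥ (vals.length : Int)) := by omega
        simp only [pvASplit, hgetj, hgetj2, hsize, if_neg hc1, if_pos hc2, if_neg hc3]
      rw [hstep]
      have hrec := ih (j + 1)
        ((c + 1 + 1, (ss ++ [PySem.Str.slice Form (some f) (some (e + 1))])
            ++ [PySem.Str.slice Form (some (e + 1)) (some f2)],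
          vs.insert (c + 1) (PySem.Str.slice Form (some (f + 1)) (some e)))) (by omega) (by omega)
      rw [hrec, hd2]
      rw [ht] at hd2; subst hd2
      simp [pvP2rest]

-- pvP2rest agrees with B's per-pair emission plus the final tail append
theorem pv_rest (Form : String) (rest : List (Int × Int)) (f e c pe : Int)
    (vs : PySem.Dict Int String) (ss : List String)
    (he0 : 0 ≤ e) (heN : e < PySem.Str.len Form)
    (hr : ∀ p ∈ rest, 0 ≤ p.2 ∧ p.2 < PySem.Str.len Form) :
    pvP2rest Form ((f, e) :: rest)
        (c + 1, ss ++ [PySem.Str.slice Form (some (pe + 1)) (some f)], vs)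
    = (let m := ((f, e) :: rest).foldl (pvBPair Form) (c, pe, vs, ss);
       (m.1, m.2.2.2 ++ [PySem.Str.slice Form (some (m.2.1 + 1)) none], m.2.2.1)) := by
  induction rest generalizing f e c pe vs ss with
  | nil =>
    simp only [pvP2rest, List.foldl_cons, List.foldl_nil, pvBPair, if_pos heN]
    rw [pv_slice_end Form (e + 1) (by omega)]
    have h2 : c + 1 + 1 = c + 2 := by ring
    simp [h2, List.append_assoc]
  | cons p rest ih =>
    obtain ⟨f2, e2⟩ := p
    have hhead := hr (f2, e2) (List.mem_cons_self ..)
    have hr' : ∀ q ∈ rest, 0 ≤ q.2 ∧ q.2 < PySem.Str.len Form :=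
      fun q hq => hr q (List.mem_cons_of_mem _ hq)
    have ihx := ih f2 e2 (c + 2) e
      (vs.insert (c + 2) (PySem.Str.slice Form (some (f + 1)) (some e)))
      (ss ++ [PySem.Str.slice Form (some (pe + 1)) (some f),
              PySem.Str.slice Form (some f) (some (e + 1))])
      hhead.1 hhead.2 hr'
    rw [pvP2rest_cons_cons]
    have h2 : c + 1 + 1 = c + 2 := by ring
    have h3 : c + 1 + 1 + 1 = c + 2 + 1 := by ring
    simp only [h2, List.append_assoc, List.cons_append, List.nil_append] at ihx ⊢
    rw [ihx]
    simp only [List.foldl_cons, pvBPair, List.append_assoc, List.cons_append, List.nil_append]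


-- proof-only: the common normal form of both programs' output, over the found pair list
def pvOut (Form : String) (vals : List (Int × Int)) : (List (Int × String)) × List String :=
  let m := pvMapB Form vals
  (m.2.2.1.items,
   if m.2.1 != -1 then m.2.2.2 ++ [PySem.Str.slice Form (some (m.2.1 + 1)) none] else m.2.2.2)

-- the PrevEnd component of B's emission fold is the last end index
theorem pv_pe (Form : String) (l : List (Int × Int)) (st : Int × Int × PySem.Dict Int String × List String) :
    (l.foldl (pvBPair Form) st).2.1 = (l.map Prod.snd).getLastD st.2.1 := by
  induction l generalizing st with
  | nil => rfl
  | cons p t ih =>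
    rw [List.foldl_cons, List.map_cons, List.getLastD_cons, ih]
    rfl

theorem pv_pe_pos (l : List (Int × Int)) (d : Int) (hd : 0 ≤ d)
    (h : ∀ p ∈ l, 0 ≤ p.2) : 0 ≤ (l.map Prod.snd).getLastD d := by
  induction l generalizing d with
  | nil => simp only [List.map_nil, List.getLastD_nil]; exact hd
  | cons p t ih =>
    rw [List.map_cons, List.getLastD_cons]
    exact ih p.2 (h p (List.mem_cons_self ..)) (fun q hq => h q (List.mem_cons_of_mem _ hq))

theorem pv_main (Form : String) : AnalyzeNamingForm Form = AnalyzeNamingForm_alt Form := by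
  have hP := pv_pass1_plain (PySem.List.enumerate Form.toList 0) (-1) (-1) []
  rw [PySem.List.enumerate_nil] at hP
  have hidx : ∀ ic ∈ PySem.List.enumerate Form.toList 0, 0 ≤ ic.1 ∧ ic.1 < PySem.Str.len Form := by
    intro ic hic
    rw [PySem.List.mem_enumerate_iff] at hic
    obtain ⟨k, hk, rfl⟩ := hic
    rw [PySem.Str.len_eq]
    constructor <;> [omega; (simp only []; omega)]
  have hinv := pv_inv (PySem.Str.len Form) (PySem.List.enumerate Form.toList 0) (-1) (-1) []
    (by simp) hidx
  have hF := pv_fuse Form (PySem.List.enumerate Form.toList 0) (-1) (-1) []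
  -- name the pair list found by pass 1
  set vals := ((PySem.List.enumerate Form.toList 0).foldl pvP1 (-1, -1, [])).2.2 with hvdef
  -- B's port equals pvOut on those pairs
  have hB : AnalyzeNamingForm_alt Form = pvOut Form vals := by
    unfold AnalyzeNamingForm_alt
    rw [show ((-1 : Int), (-1 : Int), (-1 : Int), PySem.Dict.mk ([] : List (Int × String)),
          ([] : List String)) = ((-1 : Int), pvMapB Form []) from rfl, hF]
    rfl
  rw [hB]
  -- A's port: pass 1 becomes the plain pair list, pass 2 becomes an indexed loop
  unfold AnalyzeNamingForm
  rw [hP]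
  have hkeys : (PySem.Dict.mk (PySem.List.enumerate vals 0)).keys
      = PySem.List.pyRange 0 (vals.length : Int) := by
    simp [PySem.Dict.keys, PySem.List.map_fst_enumerate]
  simp only [hkeys, pv_keys]
  clear hP hF hB hvdef
  rcases vals with _ | ⟨⟨f0, e0⟩, rest⟩
  · rfl
  have h00 := hinv (f0, e0) (List.mem_cons_self ..)
  have hget0 : (PySem.Dict.mk (PySem.List.enumerate ((f0, e0) :: rest) 0)).getD 0 (0, 0)
      = (f0, e0) := by rfl
  have hsize : ((PySem.Dict.mk (PySem.List.enumerate ((f0, e0) :: rest) 0)).size : Int)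
      = (((f0, e0) :: rest).length : Int) := by
    simp [PySem.Dict.size, PySem.List.length_enumerate]
  rcases rest with _ | ⟨⟨f1, e1⟩, rest2⟩
  · -- exactly one pair
    have hstep : pvASplit Form (PySem.Dict.mk (PySem.List.enumerate [(f0, e0)] 0))
        (-1, [], PySem.Dict.mk []) ((0 : Int), (0 : Int))
        = (1, [PySem.Str.slice Form (some 0) (some f0),
               PySem.Str.slice Form (some f0) (some (e0 + 1)),
               PySem.Str.slice Form (some (e0 + 1)) (some (PySem.Str.len Form))],
           (PySem.Dict.mk []).insert 1 (PySem.Str.slice Form (some (f0 + 1)) (some e0))) := by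
      have hc1 : ((0 : Int) ≤ 0) := le_refl 0
      have hc2 : ¬((0 : Int) + 1 < (([(f0, e0)] : List (Int × Int)).length : Int)) := by simp
      have hc3 : ((0 : Int) + 1 ≥ (([(f0, e0)] : List (Int × Int)).length : Int)) := by simp
      simp only [pvASplit, hget0, hsize, if_pos hc1, if_neg hc2, if_pos hc3, if_pos h00.2]
      norm_num
    simp only [List.length_cons, List.length_nil, Nat.zero_add, List.range_succ, List.range_zero,
      List.nil_append, List.map_cons, List.map_nil, List.foldl_cons, List.foldl_nil, Nat.cast_zero]
    rw [hstep]
    have hguard : ((e0 : Int) != -1) = true := by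
      simp only [bne_iff_ne, ne_eq]
      omega
    simp only [pvOut, pvMapB, List.foldl_cons, List.foldl_nil, pvBPair, hguard, if_pos]
    rw [← pv_slice_end Form (e0 + 1) (by omega)]
    norm_num
  · -- at least two pairs
    have hget1 : (PySem.Dict.mk (PySem.List.enumerate ((f0, e0) :: (f1, e1) :: rest2) 0)).getD
        ((0 : Int) + 1) (0, 0) = (f1, e1) := by rfl
    have hstep : pvASplit Form (PySem.Dict.mk (PySem.List.enumerate ((f0, e0) :: (f1, e1) :: rest2) 0))
        (-1, [], PySem.Dict.mk []) ((0 : Int), (0 : Int))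
        = (1 + 1, ([PySem.Str.slice Form (some 0) (some f0),
                PySem.Str.slice Form (some f0) (some (e0 + 1))])
             ++ [PySem.Str.slice Form (some (e0 + 1)) (some f1)],
           (PySem.Dict.mk []).insert 1 (PySem.Str.slice Form (some (f0 + 1)) (some e0))) := by
      have hc1 : ((0 : Int) ≤ 0) := le_refl 0
      have hc2 : ((0 : Int) + 1 < ((((f0, e0) :: (f1, e1) :: rest2) : List (Int × Int)).length : Int)) := by
        simp
      have hc3 : ¬((0 : Int) + 1 ≥ ((((f0, e0) :: (f1, e1) :: rest2) : List (Int × Int)).length : Int)) := by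
        simp
      simp only [pvASplit, hget0, hget1, hsize, if_pos hc1, if_pos hc2, if_neg hc3]
      norm_num
    have hlen : ((f0, e0) :: (f1, e1) :: rest2).length = rest2.length + 2 := by simp
    rw [hlen, List.range_eq_range', List.range'_succ, List.map_cons, List.foldl_cons]
    simp only [Nat.cast_zero, Nat.zero_add]
    rw [hstep]
    have hrest := pv_idx Form ((f0, e0) :: (f1, e1) :: rest2) (rest2.length + 1) 1
      ((1 + 1, ([PySem.Str.slice Form (some 0) (some f0),
            PySem.Str.slice Form (some f0) (some (e0 + 1))])
         ++ [PySem.Str.slice Form (some (e0 + 1)) (some f1)],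
        (PySem.Dict.mk []).insert 1 (PySem.Str.slice Form (some (f0 + 1)) (some e0))))
      (by omega) (le_refl 1)
    rw [hrest]
    have h11 := hinv (f1, e1) (List.mem_cons_of_mem _ (List.mem_cons_self ..))
    have hr2 : ∀ p ∈ (f1, e1) :: rest2, 0 ≤ p.2 ∧ p.2 < PySem.Str.len Form :=
      fun p hp => hinv p (List.mem_cons_of_mem _ hp)
    have hrw := pv_rest Form rest2 f1 e1 1 e0
      ((PySem.Dict.mk []).insert 1 (PySem.Str.slice Form (some (f0 + 1)) (some e0)))
      ([PySem.Str.slice Form (some 0) (some f0), PySem.Str.slice Form (some f0) (some (e0 + 1))])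
      h11.1 h11.2 (fun q hq => hr2 q (List.mem_cons_of_mem _ hq))
    rw [List.drop_one, List.tail_cons, hrw]
    -- identify the emission fold with pvMapB on the whole pair list
    have hfirst : pvBPair Form (-1, -1, PySem.Dict.mk [], []) (f0, e0)
        = (1, e0, (PySem.Dict.mk []).insert 1 (PySem.Str.slice Form (some (f0 + 1)) (some e0)),
           [PySem.Str.slice Form (some 0) (some f0), PySem.Str.slice Form (some f0) (some (e0 + 1))]) := by
      simp only [pvBPair]
      norm_num
    have hmap : pvMapB Form ((f0, e0) :: (f1, e1) :: rest2)
        = ((f1, e1) :: rest2).foldl (pvBPair Form)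
            (1, e0, (PySem.Dict.mk []).insert 1 (PySem.Str.slice Form (some (f0 + 1)) (some e0)),
             [PySem.Str.slice Form (some 0) (some f0), PySem.Str.slice Form (some f0) (some (e0 + 1))]) := by
      rw [pvMapB, List.foldl_cons, hfirst]
    have hguard : ((((f1, e1) :: rest2).foldl (pvBPair Form)
        (1, e0, (PySem.Dict.mk []).insert 1 (PySem.Str.slice Form (some (f0 + 1)) (some e0)),
         [PySem.Str.slice Form (some 0) (some f0),
          PySem.Str.slice Form (some f0) (some (e0 + 1))])).2.1 != -1) = true := by
      rw [pv_pe]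
      simp only [bne_iff_ne, ne_eq]
      have := pv_pe_pos ((f1, e1) :: rest2) e0 h00.1 (fun q hq => (hr2 q hq).1)
      omega
    simp only [pvOut, hmap, hguard, if_pos]

-- ===== VERDICT (by name: the statement is the Claim_ definition above) =====
theorem AnalyzeNamingForm_spec : Claim_equal_AnalyzeNamingForm := by
  intro Form _
  unfold Spec_AnalyzeNamingForm
  exact pv_main Form
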